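-- pv_equiv track=rewrite | github.com/lee-JunR/Algorithm_BAEKJOON | 백준/Silver/1541. 잃어버린 괄호/잃어버린 괄호.py | solution
-- ===== SOURCE A (Python) =====
-- def solution(input):
--     input = input.split('-')
--     answer = 0
--
--     for i in input[0].split('+'):
--         answer += int(i)
--
--     for i in range(1, len(input)):
--         for j in input[i].split('+'):
--             answer -= int(j)
--     return answer
-- ===== SOURCE B (Python) =====
-- def solution(input):
--     # single left-to-right character scan with a sign flag; no splitting
--     total = 0
--     negative = False
--     num = ''
--     for ch in input + '+':          # trailing '+' flushes the last number
--         if ch == '+' or ch == '-':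
--             value = int(num)
--             total += -value if negative else value
--             negative = negative or ch == '-'
--             num = ''
--         else:
--             num += ch
--     return total
-- ===== Notes on version B (the rewrite author's own statement) =====
-- stated objective: alternative
-- what changed: B never splits the string: it makes a single character-by-character scan with an accumulator, a sticky sign flag set at the first '-', and a digit buffer flushed at each operator, instead of A's split-on-'-' / split-on-'+' nested loops.
import Mathlib
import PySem

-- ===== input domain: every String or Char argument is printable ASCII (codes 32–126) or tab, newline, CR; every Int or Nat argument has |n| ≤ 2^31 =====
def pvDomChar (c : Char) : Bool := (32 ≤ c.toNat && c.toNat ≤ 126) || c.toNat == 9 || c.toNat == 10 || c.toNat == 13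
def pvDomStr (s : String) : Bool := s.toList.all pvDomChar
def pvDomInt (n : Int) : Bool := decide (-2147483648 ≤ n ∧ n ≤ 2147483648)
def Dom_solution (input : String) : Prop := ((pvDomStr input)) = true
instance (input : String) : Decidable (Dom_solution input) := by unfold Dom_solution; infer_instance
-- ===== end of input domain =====

-- B replaces A's split-on-'-'/split-on-'+' nested loops by one character scan with a sticky sign flag (alternative, same cost).

-- ===== PORT A =====
-- int(i) raises on unparsable tokens; Pre_ guarantees every token parses, so getD 0 is never taken inside Pre_
def solution (input : String) : Int :=
  let parts := PySem.Chars.splitOn input.toList ['-']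
  let answer : Int :=
    (PySem.Chars.splitOn (PySem.List.pyGetD parts 0 []) ['+']).foldl
      (fun a i => a + (PySem.Int.ofChars? i).getD 0) 0
  (PySem.List.pyRange 1 (parts.length : Int) 1).foldl
    (fun a j =>
      (PySem.Chars.splitOn (PySem.List.pyGetD parts j []) ['+']).foldl
        (fun a' jj => a' - (PySem.Int.ofChars? jj).getD 0) a) answer

-- ===== PORT B =====
-- one fold over the characters of input + '+' ; state = (total, negative, num);
-- `ch == '+' or ch == '-'` ported as a Bool disjunction; int(num) as ofChars? with getD 0 (never taken inside Pre_)
def solution_alt (input : String) : Int :=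
  ((input.toList ++ ['+']).foldl
    (fun (st : Int × Bool × List Char) ch =>
      if (ch == '+' || ch == '-') = true then
        let value := (PySem.Int.ofChars? st.2.2).getD 0
        (st.1 + (if st.2.1 then -value else value), st.2.1 || (ch == '-'), ([] : List Char))
      else
        (st.1, st.2.1, st.2.2 ++ [ch]))
    (0, false, [])).1

-- ===== PRECONDITION & SPEC =====
-- Pre_ excludes exactly the inputs on which Python A raises ValueError: some '+'-/'-'-delimited token fails int()
def Pre_solution (input : String) : Prop :=
  ((PySem.Chars.splitOn input.toList ['-']).all
    (fun g => (PySem.Chars.splitOn g ['+']).all (fun t => (PySem.Int.ofChars? t).isSome))) = true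
instance (input : String) : Decidable (Pre_solution input) := by unfold Pre_solution; infer_instance
def pvWitness_solution : String := "55-50+40"

def Spec_solution (input : String) (out : Int) : Prop := out = solution_alt input
instance (input : String) (out : Int) : Decidable (Spec_solution input out) := by unfold Spec_solution; infer_instance

-- ===== CLAIM (what is proved, stated in full; the proofs are below) =====
def Claim_equal_solution : Prop := ∀ (input : String), Dom_solution input → Pre_solution input → Spec_solution input (solution input)

-- ===== LEMMAS AND PROOFS =====

-- token value: int(t) with 0 for an unparsable token (never reached inside Pre_)
def pvTok (x : List Char) : Int := (PySem.Int.ofChars? x).getD 0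

def pvIsP (c : Char) : Bool := c == '+'
def pvIsM (c : Char) : Bool := c == '-'
def pvIsPM (c : Char) : Bool := c == '+' || c == '-'

-- structural splitter: pvS p l = (first piece, remaining pieces) of l split at chars satisfying p
def pvS (p : Char → Bool) : List Char → List Char × List (List Char)
  | [] => ([], [])
  | c :: cs =>
      let r := pvS p cs
      if p c then ([], r.1 :: r.2) else (c :: r.1, r.2)

theorem pvS_nil (p : Char → Bool) : pvS p [] = ([], []) := rfl
theorem pvS_cons_pos (p : Char → Bool) (c : Char) (cs : List Char) (h : p c = true) :
    pvS p (c :: cs) = ([], (pvS p cs).1 :: (pvS p cs).2) := by simp [pvS, h]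
theorem pvS_cons_neg (p : Char → Bool) (c : Char) (cs : List Char) (h : p c = false) :
    pvS p (c :: cs) = (c :: (pvS p cs).1, (pvS p cs).2) := by simp [pvS, h]

-- group sum: sum of int() over the '+'-tokens of one '-'-group
def pvGS (g : List Char) : Int :=
  pvTok (pvS pvIsP g).1 + ((pvS pvIsP g).2.map pvTok).sum

-- B's recursion as a structural function: remaining chars, sticky sign flag, digit buffer
def pvSpec : List Char → Bool → List Char → Int
  | [], sm, num => if sm then -pvTok num else pvTok num
  | c :: cs, sm, num =>
      if pvIsPM c then
        (if sm then -pvTok num else pvTok num) + pvSpec cs (sm || pvIsM c) []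
      else pvSpec cs sm (num ++ [c])

-- splitOn with a one-char separator is pvS (fuel-independence of splitOn.go)
theorem pv_go_eq (c : Char) : ∀ (fuel : Nat) (l cur : List Char) (acc : List (List Char)),
    l.length < fuel →
    PySem.Chars.splitOn.go [c] fuel l cur acc
      = acc.reverse ++ (cur.reverse ++ (pvS (· == c) l).1) :: (pvS (· == c) l).2 := by
  intro fuel
  induction fuel with
  | zero => intro l cur acc h; omega
  | succ f ih =>
      intro l cur acc h
      cases l with
      | nil => simp [PySem.Chars.splitOn.go, pvS]
      | cons x rest =>
          have hstep : PySem.Chars.splitOn.go [c] (f + 1) (x :: rest) cur acc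
              = if [c].isPrefixOf (x :: rest) then
                  PySem.Chars.splitOn.go [c] f (List.drop [c].length (x :: rest)) [] (cur.reverse :: acc)
                else PySem.Chars.splitOn.go [c] f rest (x :: cur) acc := rfl
          rw [hstep]
          by_cases hx : x = c
          · subst hx
            rw [if_pos (by simp [List.isPrefixOf])]
            rw [show List.drop [x].length (x :: rest) = rest from rfl]
            rw [ih rest [] ((cur.reverse) :: acc) (by simpa using Nat.lt_of_succ_lt_succ h)]
            rw [pvS_cons_pos _ _ _ (by simp)]
            simp
          · rw [if_neg (by simp only [List.isPrefixOf, Bool.and_true, beq_iff_eq]; exact fun hh => hx hh.symm)]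
            rw [ih rest (x :: cur) acc (by simpa using Nat.lt_of_succ_lt_succ h)]
            rw [pvS_cons_neg _ _ _ (by simp [hx])]
            simp

theorem pv_splitOn_eq (c : Char) (l : List Char) :
    PySem.Chars.splitOn l [c] = (pvS (· == c) l).1 :: (pvS (· == c) l).2 := by
  unfold PySem.Chars.splitOn
  rw [pv_go_eq c (l.length + 1) l [] [] (by omega)]
  simp

theorem pvS_P_eq : pvS (· == '+') = pvS pvIsP := by rfl
theorem pvS_M_eq : pvS (· == '-') = pvS pvIsM := by rfl

-- pvGS on a cons
theorem pvGS_cons_plus (g : List Char) : pvGS ('+' :: g) = pvGS g := by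
  have h := pvS_cons_pos pvIsP '+' g (by decide)
  simp only [pvGS, h, List.map_cons, List.sum_cons]
  have htok0 : pvTok [] = 0 := by decide
  rw [htok0]; ring

theorem pvGS_cons_other (x : Char) (g : List Char) (h : pvIsP x = false) :
    pvGS (x :: g) = pvTok (x :: (pvS pvIsP g).1) + ((pvS pvIsP g).2.map pvTok).sum := by
  simp only [pvGS, pvS_cons_neg pvIsP x g h]

-- first token of the split-on-both equals first '+'-token of the first '-'-group
theorem pv_heads (l : List Char) :
    (pvS pvIsPM l).1 = (pvS pvIsP (pvS pvIsM l).1).1 := by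
  induction l with
  | nil => simp [pvS]
  | cons x cs ih =>
      by_cases h1 : x = '+'
      · subst h1
        rw [pvS_cons_pos pvIsPM _ _ (by decide), pvS_cons_neg pvIsM _ _ (by decide),
            pvS_cons_pos pvIsP _ _ (by decide)]
      · by_cases h2 : x = '-'
        · subst h2
          rw [pvS_cons_pos pvIsPM _ _ (by decide), pvS_cons_pos pvIsM _ _ (by decide)]
          simp [pvS]
        · rw [pvS_cons_neg pvIsPM _ _ (by simp [pvIsPM, h1, h2]),
              pvS_cons_neg pvIsM _ _ (by simp [pvIsM, h2]),
              pvS_cons_neg pvIsP _ _ (by simp [pvIsP, h1])]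
          simpa using ih

-- total of all tokens split on both delimiters = total over '-'-groups of group sums
theorem pv_flat (l : List Char) :
    pvTok (pvS pvIsPM l).1 + ((pvS pvIsPM l).2.map pvTok).sum
      = pvGS (pvS pvIsM l).1 + ((pvS pvIsM l).2.map pvGS).sum := by
  have htok0 : pvTok [] = 0 := by decide
  induction l with
  | nil => simp [pvS, pvGS, htok0]
  | cons x cs ih =>
      by_cases h1 : x = '+'
      · subst h1
        rw [pvS_cons_pos pvIsPM _ _ (by decide), pvS_cons_neg pvIsM _ _ (by decide)]
        simp only [List.map_cons, List.sum_cons, htok0, pvGS_cons_plus]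
        unfold pvGS at ih ⊢
        linarith [ih]
      · by_cases h2 : x = '-'
        · subst h2
          rw [pvS_cons_pos pvIsPM _ _ (by decide), pvS_cons_pos pvIsM _ _ (by decide)]
          simp only [List.map_cons, List.sum_cons, htok0]
          have hg0 : pvGS [] = 0 := by decide
          rw [hg0]
          linarith [ih]
        · rw [pvS_cons_neg pvIsPM _ _ (by simp [pvIsPM, h1, h2]),
              pvS_cons_neg pvIsM _ _ (by simp [pvIsM, h2]),
              pvGS_cons_other x _ (by simp [pvIsP, h1])]
          unfold pvGS at ih ⊢
          rw [pv_heads cs] at ih ⊢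
          dsimp only
          linarith [ih]

-- after the first '-' everything is subtracted, regardless of the delimiter kind
theorem pv_neg (l : List Char) : ∀ (num : List Char),
    pvSpec l true num
      = -(pvTok (num ++ (pvS pvIsPM l).1) + ((pvS pvIsPM l).2.map pvTok).sum) := by
  induction l with
  | nil => intro num; simp [pvSpec, pvS]
  | cons x cs ih =>
      intro num
      cases hd : pvIsPM x with
      | true =>
          rw [pvS_cons_pos pvIsPM _ _ hd]
          simp only [pvSpec, hd, if_true, Bool.true_or, List.map_cons, List.sum_cons]
          rw [ih []]
          simp
          ring
      | false =>
          rw [pvS_cons_neg pvIsPM _ _ hd]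
          simp only [pvSpec, hd, Bool.false_eq_true, if_false]
          rw [ih (num ++ [x])]
          simp

-- before the first '-' : the first group (with num prefixing its first token) minus the rest
theorem pv_pos (l : List Char) : ∀ (num : List Char),
    pvSpec l false num
      = pvTok (num ++ (pvS pvIsP (pvS pvIsM l).1).1)
        + ((pvS pvIsP (pvS pvIsM l).1).2.map pvTok).sum
        - ((pvS pvIsM l).2.map pvGS).sum := by
  induction l with
  | nil => intro num; simp [pvSpec, pvS]
  | cons x cs ih =>
      intro num
      by_cases h1 : x = '+'
      · subst h1
        rw [pvS_cons_neg pvIsM _ _ (by decide), pvS_cons_pos pvIsP _ _ (by decide)]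
        simp only [pvSpec, show pvIsPM '+' = true by decide, if_true,
          show pvIsM '+' = false by decide, Bool.or_false, List.map_cons, List.sum_cons]
        rw [ih []]
        simp
        ring
      · by_cases h2 : x = '-'
        · subst h2
          rw [pvS_cons_pos pvIsM _ _ (by decide)]
          simp only [pvSpec, show pvIsPM '-' = true by decide, if_true,
            show pvIsM '-' = true by decide, Bool.or_true, List.map_cons, List.sum_cons]
          rw [pv_neg cs []]
          have hflat := pv_flat cs
          unfold pvGS at hflat ⊢
          simp only [pvS_nil, List.map_nil, List.sum_nil, List.append_nil, List.nil_append,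
            Bool.false_eq_true, if_false]
          linarith [hflat]
        · rw [pvS_cons_neg pvIsM _ _ (by simp [pvIsM, h2]),
              pvS_cons_neg pvIsP _ _ (by simp [pvIsP, h1])]
          simp only [pvSpec, show pvIsPM x = false by simp [pvIsPM, h1, h2],
            Bool.false_eq_true, if_false]
          rw [ih (num ++ [x])]
          simp

-- B's fold over l ++ ['+'] computes t + pvSpec l sm num
theorem pv_fold (l : List Char) : ∀ (t : Int) (sm : Bool) (num : List Char),
    ((l ++ ['+']).foldl
      (fun (st : Int × Bool × List Char) ch =>
        if (ch == '+' || ch == '-') = true then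
          let value := (PySem.Int.ofChars? st.2.2).getD 0
          (st.1 + (if st.2.1 then -value else value), st.2.1 || (ch == '-'), ([] : List Char))
        else (st.1, st.2.1, st.2.2 ++ [ch]))
      (t, sm, num)).1 = t + pvSpec l sm num := by
  induction l with
  | nil =>
      intro t sm num
      simp [pvSpec, pvTok]
  | cons x cs ih =>
      intro t sm num
      cases hd : pvIsPM x with
      | true =>
          simp only [List.cons_append, List.foldl_cons, if_pos (show ((x == '+' || x == '-') = true) from hd)]
          rw [ih]
          simp only [pvSpec, hd, if_true, pvTok, pvIsM]
          ring
      | false =>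
          simp only [List.cons_append, List.foldl_cons, if_neg (show ¬ ((x == '+' || x == '-') = true) by simp only [show (x == '+' || x == '-') = false from hd]; simp)]
          rw [ih]
          simp only [pvSpec, hd, Bool.false_eq_true, if_false]

-- A-side loop reshaping
theorem pv_foldl_sub (l : List (List Char)) (a : Int) :
    l.foldl (fun a' jj => a' - pvTok jj) a = a - (l.map pvTok).sum := by
  induction l generalizing a with
  | nil => simp
  | cons x xs ih => simp [List.foldl, ih]; ring

theorem pv_drop_foldl (l : List (List Char)) (a : Int) :
    l.foldl (fun acc g =>
      (PySem.Chars.splitOn g ['+']).foldl (fun a' jj => a' - pvTok jj) acc) a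
      = a - (l.map pvGS).sum := by
  induction l generalizing a with
  | nil => simp
  | cons x xs ih =>
      simp only [List.foldl_cons, List.map_cons, List.sum_cons]
      rw [pv_foldl_sub, ih]
      rw [pv_splitOn_eq '+' x, pvS_P_eq]
      simp [pvGS]
      ring

-- end-to-end: A's body equals B's body on any character list
theorem pv_main (l : List Char) :
    ((PySem.List.pyRange 1 ((PySem.Chars.splitOn l ['-']).length : Int) 1).foldl
       (fun a j =>
         (PySem.Chars.splitOn (PySem.List.pyGetD (PySem.Chars.splitOn l ['-']) j []) ['+']).foldl
           (fun a' jj => a' - pvTok jj) a)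
       ((PySem.Chars.splitOn (PySem.List.pyGetD (PySem.Chars.splitOn l ['-']) 0 []) ['+']).foldl
         (fun a i => a + pvTok i) 0))
    = ((l ++ ['+']).foldl
        (fun (st : Int × Bool × List Char) ch =>
          if (ch == '+' || ch == '-') = true then
            let value := (PySem.Int.ofChars? st.2.2).getD 0
            (st.1 + (if st.2.1 then -value else value), st.2.1 || (ch == '-'), ([] : List Char))
          else (st.1, st.2.1, st.2.2 ++ [ch]))
        (0, false, [])).1 := by
  rw [pv_fold l 0 false []]
  rw [pv_pos l []]
  simp only [List.nil_append]
  rw [pv_splitOn_eq '-' l, pvS_M_eq]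
  rw [PySem.List.foldl_pyRange_pyGetD' ((pvS pvIsM l).1 :: (pvS pvIsM l).2) []
        (fun acc g => (PySem.Chars.splitOn g ['+']).foldl (fun a' jj => a' - pvTok jj) acc)
        _ (by norm_num)]
  rw [show List.drop (Int.toNat 1) ((pvS pvIsM l).1 :: (pvS pvIsM l).2) = (pvS pvIsM l).2 from rfl,
      pv_drop_foldl,
      PySem.List.foldl_add (PySem.Chars.splitOn (PySem.List.pyGetD ((pvS pvIsM l).1 :: (pvS pvIsM l).2) 0 []) ['+']) pvTok 0]
  rw [PySem.List.pyGetD_zero_cons]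
  rw [pv_splitOn_eq '+' (pvS pvIsM l).1, pvS_P_eq]
  simp only [List.map_cons, List.sum_cons]
  ring

-- ===== VERDICT (by name: the statement is the Claim_ definition above) =====
theorem solution_spec : Claim_equal_solution := by
  intro input _ _
  exact pv_main input.toList
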